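-- pv_equiv track=rewrite | github.com/tommasofiori2000-glitch/email-classifier-ml | PROGETTO1__FINEEE.py | fn_group1
-- ===== SOURCE A (Python) =====
-- def fn_group1(freq_list, groups_list):
--     # search keywords into freq_list
--     s = ""
--     idx=0
--     for group in groups_list:
--         found = 0
--         for key in group:
--             key_lower = key.lower()
--             for fw in freq_list:
--                fw_lower =  fw.lower();
--                if fw_lower.find(key_lower) == 0:
--                     found = idx + 1
--
--         idx += 1
--         if found > 0:
--           s += str(found)
--
--     return s
-- ===== SOURCE B (Python) =====
-- def fn_group1(freq_list, groups_list):
--     # Precompute the set of ALL lowercase prefixes of the frequency words once,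
--     # then each key needs only one hash lookup (removes the inner scan over freq_list).
--     prefixes = set()
--     for fw in freq_list:
--         w = fw.lower()
--         for j in range(len(w) + 1):
--             prefixes.add(w[:j])
--     out = []
--     for i, group in enumerate(groups_list):
--         if any(key.lower() in prefixes for key in group):
--             out.append(str(i + 1))
--     return "".join(out)
-- ===== Notes on version B (the rewrite author's own statement) =====
-- stated objective: faster
-- what changed: B precomputes one hash set of all lowercase prefixes of the frequency words and tests each key with a single set lookup, replacing A's inner scan of freq_list (with a lowercase of every freq word) per key; groups are handled with enumerate/any/join instead of manual idx/found counters.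
import Mathlib
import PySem

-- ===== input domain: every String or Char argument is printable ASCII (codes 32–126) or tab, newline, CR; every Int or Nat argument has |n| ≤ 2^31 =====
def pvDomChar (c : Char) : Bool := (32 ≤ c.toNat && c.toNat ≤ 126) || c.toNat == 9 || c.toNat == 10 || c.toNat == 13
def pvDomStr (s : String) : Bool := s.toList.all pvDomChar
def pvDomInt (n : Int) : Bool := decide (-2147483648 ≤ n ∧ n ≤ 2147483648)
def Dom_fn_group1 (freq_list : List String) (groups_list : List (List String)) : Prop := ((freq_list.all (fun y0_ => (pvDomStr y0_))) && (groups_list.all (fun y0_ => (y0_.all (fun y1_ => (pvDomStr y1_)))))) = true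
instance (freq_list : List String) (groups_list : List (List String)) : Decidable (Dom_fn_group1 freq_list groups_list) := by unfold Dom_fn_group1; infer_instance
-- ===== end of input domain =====

-- B replaces A's inner scan of freq_list per key by one precomputed set of all
-- lowercase prefixes of the frequency words, queried once per key.

-- ===== PORT A =====
-- inner double loop of A: for key in group: for fw in freq_list: if fw.lower().find(key.lower()) == 0: found = idx + 1
def fnA_inner (freq_list : List String) (idx : Int) (group : List String) : Int :=
  group.foldl (fun found key =>
    freq_list.foldl (fun found fw =>
      if PySem.Str.find (PySem.Str.lower fw) (PySem.Str.lower key) = 0 then idx + 1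
      else found) found) 0

-- one iteration of A's outer loop: compute found, idx += 1, if found > 0: s += str(found)
def fnA_step (freq_list : List String) (acc : String × Int) (group : List String) : String × Int :=
  let found := fnA_inner freq_list acc.2 group
  if found > 0 then (acc.1 ++ PySem.Int.toStr found, acc.2 + 1) else (acc.1, acc.2 + 1)

def fn_group1 (freq_list : List String) (groups_list : List (List String)) : String :=
  (groups_list.foldl (fnA_step freq_list) ("", 0)).1

-- ===== PORT B =====
-- B: the set of all prefixes w[:j] (0 ≤ j ≤ len(w)) of the lowercased frequency words
def fnB_prefixes (freq_list : List String) : PySem.Set String :=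
  freq_list.foldl (fun pre fw =>
    (PySem.List.pyRange 0 (PySem.Str.len (PySem.Str.lower fw) + 1) 1).foldl
      (fun pre j => PySem.Set.add pre (PySem.Str.slice (PySem.Str.lower fw) none (some j)))
      pre)
    PySem.Set.empty

-- B's loop body: if any(key.lower() in prefixes for key in group): out.append(str(i + 1))
def fnB_step (prefixes : PySem.Set String) (out : List String) (p : Int × List String) : List String :=
  if p.2.any (fun key => decide (PySem.Str.lower key ∈ prefixes)) then
    out ++ [PySem.Int.toStr (p.1 + 1)]
  else out

def fn_group1_alt (freq_list : List String) (groups_list : List (List String)) : String :=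
  let prefixes := fnB_prefixes freq_list
  PySem.Str.join "" ((PySem.List.enumerate groups_list 0).foldl (fnB_step prefixes) [])

-- ===== PRECONDITION & SPEC =====
def Spec_fn_group1 (freq_list : List String) (groups_list : List (List String)) (out : String) : Prop := out = fn_group1_alt freq_list groups_list
instance (freq_list : List String) (groups_list : List (List String)) (out : String) : Decidable (Spec_fn_group1 freq_list groups_list out) := by unfold Spec_fn_group1; infer_instance

-- ===== CLAIM (what is proved, stated in full; the proofs are below) =====
def Claim_equal_fn_group1 : Prop := ∀ (freq_list : List String) (groups_list : List (List String)), Dom_fn_group1 freq_list groups_list → Spec_fn_group1 freq_list groups_list (fn_group1 freq_list groups_list)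

-- ===== LEMMAS AND PROOFS =====

-- whether some group member's lowercasing is a prefix of some frequency word's lowercasing
def pvMatch (freq_list : List String) (group : List String) : Bool :=
  group.any (fun key => freq_list.any (fun fw =>
    decide (PySem.Str.find (PySem.Str.lower fw) (PySem.Str.lower key) = 0)))

-- the common rendering of the result (as a char list)
def pvRender (freq_list : List String) : List (List String) → Int → List Char
  | [], _ => []
  | g :: t, idx =>
      (if pvMatch freq_list g then (PySem.Int.toStr (idx + 1)).toList else [])
        ++ pvRender freq_list t (idx + 1)

lemma find_eq_zero_iff (s sub : List Char) :
    PySem.Chars.find s sub = 0 ↔ sub <+: s := by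
  constructor
  · intro h
    have h0 : (0:Int) ≤ PySem.Chars.find s sub := by omega
    have := (PySem.Chars.find_spec h0).1
    rwa [h] at this
    
  · intro h
    have h0 : (0:Int) ≤ PySem.Chars.find s sub :=
      (PySem.Chars.find_nonneg_iff s sub).mpr h.isInfix
    obtain ⟨h1, h2⟩ := PySem.Chars.find_spec h0
    by_contra hne
    have hpos : 0 < (PySem.Chars.find s sub).toNat := by omega
    exact h2 0 hpos (by simpa using h)

lemma foldl_if_const {α β : Type} (P : α → Prop) [DecidablePred P] (c : β) :
    ∀ (l : List α) (a : β),
      l.foldl (fun acc x => if P x then c else acc) a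
        = if l.any (fun x => decide (P x)) then c else a := by
  intro l
  induction l with
  | nil => intro a; simp
  | cons x t ih =>
      intro a
      by_cases hx : P x <;> simp [hx, ih]

lemma inner_eq (freq_list : List String) (idx : Int) (g : List String) :
    fnA_inner freq_list idx g = if pvMatch freq_list g then idx + 1 else 0 := by
  unfold fnA_inner pvMatch
  have hfw : ∀ (key : String) (a : Int),
      freq_list.foldl (fun found fw =>
        if PySem.Str.find (PySem.Str.lower fw) (PySem.Str.lower key) = 0 then idx + 1
        else found) a
      = if freq_list.any (fun fw =>
          decide (PySem.Str.find (PySem.Str.lower fw) (PySem.Str.lower key) = 0))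
        then idx + 1 else a := by
    intro key a
    exact foldl_if_const
      (fun fw => PySem.Str.find (PySem.Str.lower fw) (PySem.Str.lower key) = 0)
      (idx + 1) freq_list a
  have hmain : ∀ (a : Int),
      g.foldl (fun found key =>
        freq_list.foldl (fun found fw =>
          if PySem.Str.find (PySem.Str.lower fw) (PySem.Str.lower key) = 0 then idx + 1
          else found) found) a
      = if g.any (fun key => freq_list.any (fun fw =>
          decide (PySem.Str.find (PySem.Str.lower fw) (PySem.Str.lower key) = 0)))
        then idx + 1 else a := by
    intro a
    induction g generalizing a with
    | nil => simp
    | cons k t ih =>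
        rw [List.foldl_cons, List.any_cons, hfw, ih]
        by_cases hk : freq_list.any (fun fw =>
            decide (PySem.Str.find (PySem.Str.lower fw) (PySem.Str.lower k) = 0)) = true <;>
          by_cases ht : (t.any (fun key => freq_list.any (fun fw =>
            decide (PySem.Str.find (PySem.Str.lower fw) (PySem.Str.lower key) = 0)))) = true <;>
          simp only [hk, ht] <;> simp
  exact hmain 0

-- A's outer fold renders pvRender
lemma A_fold (freq_list : List String) :
    ∀ (t : List (List String)) (s : String) (idx : Int), 0 ≤ idx →
      ((t.foldl (fnA_step freq_list) (s, idx)).1).toList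
        = s.toList ++ pvRender freq_list t idx := by
  intro t
  induction t with
  | nil => intro s idx _; simp [pvRender]
  | cons g t ih =>
      intro s idx hidx
      simp only [List.foldl_cons]
      by_cases hm : pvMatch freq_list g = true
      · have hstep : fnA_step freq_list (s, idx) g
            = (s ++ PySem.Int.toStr (idx + 1), idx + 1) := by
          unfold fnA_step
          rw [inner_eq]
          simp [hm]
          omega
        rw [hstep, ih _ _ (by omega)]
        simp [pvRender, hm]
      · have hstep : fnA_step freq_list (s, idx) g = (s, idx + 1) := by
          unfold fnA_step
          rw [inner_eq]
          simp [hm]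
        rw [hstep, ih _ _ (by omega)]
        simp [pvRender, hm]

-- the prefix set contains exactly the prefixes of the lowercased frequency words
lemma mem_add_range (w : String) (pre : PySem.Set String) (x : String) :
    ∀ (js : List Int),
      x ∈ js.foldl (fun pre j => PySem.Set.add pre (PySem.Str.slice w none (some j))) pre
        ↔ x ∈ pre ∨ ∃ j ∈ js, x = PySem.Str.slice w none (some j) := by
  intro js
  induction js generalizing pre with
  | nil => simp
  | cons j t ih =>
      simp only [List.foldl_cons, ih, PySem.Set.mem_add, List.mem_cons]
      constructor
      · rintro (⟨h | h⟩ | ⟨j', hj', hx⟩)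
        · exact Or.inl h
        · exact Or.inr ⟨j, Or.inl rfl, h⟩
        · exact Or.inr ⟨j', Or.inr hj', hx⟩
      · rintro (h | ⟨j', (rfl | hj'), hx⟩)
        · exact Or.inl (Or.inl h)
        · exact Or.inl (Or.inr hx)
        · exact Or.inr ⟨j', hj', hx⟩

lemma slice_prefix_iff (w x : String) :
    (∃ j ∈ PySem.List.pyRange 0 (PySem.Str.len w + 1) 1,
        x = PySem.Str.slice w none (some j))
      ↔ x.toList <+: w.toList := by
  constructor
  · rintro ⟨j, hj, rfl⟩
    rw [PySem.List.mem_pyRange_one] at hj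
    have h0 : (0:Int) ≤ j := hj.1
    have : (PySem.Str.slice w none (some j)).toList = w.toList.take j.toNat := by
      rw [PySem.Str.toList_slice, PySem.Chars.slice_eq_listSlice,
        PySem.List.slice_to w.toList h0]
    rw [this]
    exact List.take_prefix _ _
  · intro h
    refine ⟨(x.toList.length : Int), ?_, ?_⟩
    · rw [PySem.List.mem_pyRange_one, PySem.Str.len_eq]
      have := h.length_le
      omega
    · apply String.toList_inj.mp
      rw [PySem.Str.toList_slice, PySem.Chars.slice_eq_listSlice,
        PySem.List.slice_to w.toList (Int.natCast_nonneg _)]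
      simp only [Int.toNat_natCast]
      exact List.prefix_iff_eq_take.mp h

lemma mem_prefixes_iff (freq_list : List String) (x : String) :
    x ∈ fnB_prefixes freq_list
      ↔ ∃ fw ∈ freq_list, x.toList <+: (PySem.Str.lower fw).toList := by
  unfold fnB_prefixes
  have main : ∀ (l : List String) (pre : PySem.Set String),
      x ∈ l.foldl (fun pre fw =>
          (PySem.List.pyRange 0 (PySem.Str.len (PySem.Str.lower fw) + 1) 1).foldl
            (fun pre j => PySem.Set.add pre (PySem.Str.slice (PySem.Str.lower fw) none (some j)))
            pre) pre
        ↔ x ∈ pre ∨ ∃ fw ∈ l, x.toList <+: (PySem.Str.lower fw).toList := by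
    intro l
    induction l with
    | nil => intro pre; simp
    | cons fw t ih =>
        intro pre
        simp only [List.foldl_cons, ih, mem_add_range, slice_prefix_iff, List.mem_cons]
        constructor
        · rintro (⟨h | h⟩ | ⟨g, hg, hx⟩)
          · exact Or.inl h
          · exact Or.inr ⟨fw, Or.inl rfl, h⟩
          · exact Or.inr ⟨g, Or.inr hg, hx⟩
        · rintro (h | ⟨g, (rfl | hg), hx⟩)
          · exact Or.inl (Or.inl h)
          · exact Or.inl (Or.inr hx)
          · exact Or.inr ⟨g, hg, hx⟩
  rw [main]
  simp [PySem.Set.empty]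

-- B's per-group test agrees with A's
lemma B_cond_eq (freq_list : List String) (g : List String) :
    g.any (fun key => decide (PySem.Str.lower key ∈ fnB_prefixes freq_list))
      = pvMatch freq_list g := by
  unfold pvMatch
  apply PySem.List.any_congr_mem
  intro key _
  rw [Bool.eq_iff_iff]
  simp only [decide_eq_true_eq, List.any_eq_true, mem_prefixes_iff]
  constructor
  · rintro ⟨fw, hfw, hpre⟩
    refine ⟨fw, hfw, ?_⟩
    rw [PySem.Str.find_eq, find_eq_zero_iff]
    exact hpre
  · rintro ⟨fw, hfw, hfind⟩
    rw [PySem.Str.find_eq, find_eq_zero_iff] at hfind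
    exact ⟨fw, hfw, hfind⟩

lemma join_nil_eq_flatten : ∀ (css : List (List Char)),
    PySem.Chars.join [] css = css.flatten := by
  intro css
  match css with
  | [] => simp [PySem.Chars.join_nil]
  | [p] => simp [PySem.Chars.join_singleton]
  | p :: q :: rest =>
      rw [PySem.Chars.join_cons_cons, join_nil_eq_flatten (q :: rest)]
      simp

-- B's fold renders pvRender
lemma B_fold (freq_list : List String) :
    ∀ (t : List (List String)) (i0 : Int),
      ((((PySem.List.enumerate t i0).foldl (fnB_step (fnB_prefixes freq_list)) []).map
        String.toList).flatten)
        = pvRender freq_list t i0 := by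
  have hstep : ∀ (out : List String) (p : Int × List String),
      fnB_step (fnB_prefixes freq_list) out p
        = if pvMatch freq_list p.2 then out ++ [PySem.Int.toStr (p.1 + 1)] else out := by
    intro out p
    unfold fnB_step
    rw [B_cond_eq]
  have hfold : ∀ (l : List (Int × List String)) (acc : List String),
      l.foldl (fnB_step (fnB_prefixes freq_list)) acc
        = acc ++ (l.filter (fun p => pvMatch freq_list p.2)).map
            (fun p => PySem.Int.toStr (p.1 + 1)) := by
    intro l
    induction l with
    | nil => intro acc; simp
    | cons p t ih =>
        intro acc
        simp only [List.foldl_cons, hstep]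
        by_cases hp : pvMatch freq_list p.2 = true
        · simp [hp, ih]
        · simp [hp, ih]
  intro t
  induction t with
  | nil => intro i0; simp [pvRender, PySem.List.enumerate]
  | cons g t ih =>
      intro i0
      rw [PySem.List.enumerate_cons]
      simp only [hfold] at ih ⊢
      by_cases hm : pvMatch freq_list g = true
      · simp only [List.filter_cons, hm, if_pos]
        simp only [List.map_cons, List.flatten_cons, List.nil_append] at ih ⊢
        rw [ih]
        simp [pvRender, hm]
      · simp only [List.filter_cons, hm]
        simp only [Bool.false_eq_true, if_false] at ih ⊢
        rw [ih]
        simp [pvRender, hm]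

-- ===== VERDICT (by name: the statement is the Claim_ definition above) =====
theorem fn_group1_spec : Claim_equal_fn_group1 := by
  intro freq_list groups_list _
  unfold Spec_fn_group1 fn_group1 fn_group1_alt
  apply String.toList_inj.mp
  rw [A_fold freq_list groups_list "" 0 (le_refl 0)]
  rw [PySem.Str.toList_join]
  have h0 : "".toList = ([] : List Char) := rfl
  rw [h0, join_nil_eq_flatten, B_fold freq_list groups_list 0]
  simp
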